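-- pv_equiv track=rewrite | github.com/JohnReid/biopsy | Python/gapped_pssms/analyse_position_dependencies.py | sites_from_states
-- ===== SOURCE A (Python) =====
-- def sites_from_states(states, sequence, background_states):
--     assert len(states) == len(sequence)
--     site_seq, site_states = [], []
--     in_site = False
--     for state, base in zip(states, sequence):
--         if in_site and state in background_states:
--             yield site_seq, site_states
--             site_seq, site_states = [], []
--         in_site = state not in background_states
--         if in_site:
--             site_seq.append(base)
--             site_states.append(state)
--     if in_site:
--         yield site_seq, site_states
-- ===== SOURCE B (Python) =====
-- def sites_from_states(states, sequence, background_states):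
--     assert len(states) == len(sequence)
--     mask = [s not in background_states for s in states]
--     n = len(mask)
--     starts = [i for i in range(n) if mask[i] and (i == 0 or not mask[i - 1])]
--     ends = [j + 1 for j in range(n) if mask[j] and (j == n - 1 or not mask[j + 1])]
--     for a, b in zip(starts, ends):
--         yield sequence[a:b], states[a:b]
-- ===== Notes on version B (the rewrite author's own statement) =====
-- stated objective: alternative
-- what changed: Replaced the single-pass in_site state machine (flag plus two mutable accumulators flushed on background states) by staged passes over indices: build a boolean non-background mask, detect run-boundary indices with two range comprehensions (starts where mask turns on, ends where it turns off), and emit each site by slicing sequence/states between the paired boundaries.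
import Mathlib
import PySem

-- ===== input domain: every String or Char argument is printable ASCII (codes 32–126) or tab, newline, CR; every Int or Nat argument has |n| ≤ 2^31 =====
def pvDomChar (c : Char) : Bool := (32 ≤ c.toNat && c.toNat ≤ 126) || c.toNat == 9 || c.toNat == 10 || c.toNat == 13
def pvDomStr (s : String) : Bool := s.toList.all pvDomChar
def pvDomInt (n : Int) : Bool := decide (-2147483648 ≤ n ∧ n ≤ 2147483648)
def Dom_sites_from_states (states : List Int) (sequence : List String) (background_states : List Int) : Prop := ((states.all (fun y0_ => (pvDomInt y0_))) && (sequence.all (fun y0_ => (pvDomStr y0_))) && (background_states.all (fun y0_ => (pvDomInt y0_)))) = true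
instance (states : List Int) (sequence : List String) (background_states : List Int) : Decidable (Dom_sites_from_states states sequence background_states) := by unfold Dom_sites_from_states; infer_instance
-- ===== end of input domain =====

-- B replaces A's in_site state machine by three staged passes — a background-membership
-- mask, boundary-index detection (run starts/ends), then slicing — for an alternative
-- decomposition; equal return values proved on Pre_ (A asserts len(states)==len(sequence)).


-- ===== PORT A =====
-- A's loop over zip(states, sequence) with state (site_seq, site_states, in_site):
-- flush on entering a background state while in a site, append while in a site,
-- final flush after the loop.
def sitesAGo (bg : List Int) (site_seq : List String) (site_states : List Int)
    (in_site : Bool) : List (Int × String) → List (List String × List Int)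
  | [] => if in_site then [(site_seq, site_states)] else []
  | (state, base) :: rest =>
    let (out, seq0, sts0) :=
      if in_site && bg.contains state then ([(site_seq, site_states)], ([] : List String), ([] : List Int))
      else ([], site_seq, site_states)
    let in' := !bg.contains state
    let (seq1, sts1) := if in' then (seq0 ++ [base], sts0 ++ [state]) else (seq0, sts0)
    out ++ sitesAGo bg seq1 sts1 in' rest

def sites_from_states (states : List Int) (sequence : List String) (background_states : List Int) : List (List String × List Int) :=
  sitesAGo background_states [] [] false (states.zip sequence)

-- ===== PORT B =====
-- B's staged passes: the mask of non-background positions, then the two index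
-- comprehensions (run starts, and run ends as one-past-the-end), then slices.
-- starts = [i for i in range(n) if mask[i] and (i == 0 or not mask[i-1])]
def startsOf (mask : List Bool) : List Nat :=
  (List.range mask.length).filter
    (fun i => mask.getD i false && (decide (i = 0) || !(mask.getD (i - 1) false)))
-- ends = [j+1 for j in range(n) if mask[j] and (j == n-1 or not mask[j+1])]
def endsOf (mask : List Bool) : List Nat :=
  ((List.range mask.length).filter
    (fun j => mask.getD j false && (decide (j = mask.length - 1) || !(mask.getD (j + 1) false)))).map (· + 1)

def sites_from_states_alt (states : List Int) (sequence : List String) (background_states : List Int) : List (List String × List Int) :=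
  let mask := states.map (fun s => !background_states.contains s)
  ((startsOf mask).zip (endsOf mask)).map (fun ab =>
    (PySem.List.slice sequence (some (ab.1 : Int)) (some (ab.2 : Int)),
     PySem.List.slice states (some (ab.1 : Int)) (some (ab.2 : Int))))

-- ===== PRECONDITION & SPEC =====
-- A's `assert len(states) == len(sequence)` raises AssertionError on unequal lengths
-- (B keeps the same assert); exactly those inputs are excluded.
def Pre_sites_from_states (states : List Int) (sequence : List String) (background_states : List Int) : Prop :=
  states.length = sequence.length
instance (states : List Int) (sequence : List String) (background_states : List Int) : Decidable (Pre_sites_from_states states sequence background_states) := by unfold Pre_sites_from_states; infer_instance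

def pvWitness_sites_from_states : List Int × List String × List Int :=
  ([0, 1, 1, 0, 2], ["a", "c", "g", "t", "a"], [0])

def Spec_sites_from_states (states : List Int) (sequence : List String) (background_states : List Int) (out : List (List String × List Int)) : Prop := out = sites_from_states_alt states sequence background_states
instance (states : List Int) (sequence : List String) (background_states : List Int) (out : List (List String × List Int)) : Decidable (Spec_sites_from_states states sequence background_states out) := by unfold Spec_sites_from_states; infer_instance

-- ===== CLAIM (what is proved, stated in full; the proofs are below) =====
def Claim_equal_sites_from_states : Prop := ∀ (states : List Int) (sequence : List String) (background_states : List Int), Dom_sites_from_states states sequence background_states → Pre_sites_from_states states sequence background_states → Spec_sites_from_states states sequence background_states (sites_from_states states sequence background_states)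

-- ===== LEMMAS AND PROOFS =====

def startsP (prev : Bool) (m : List Bool) : List Nat :=
  (List.range m.length).filter
    (fun i => m.getD i false && !(if i = 0 then prev else m.getD (i - 1) false))

theorem startsP_cons (prev c : Bool) (m : List Bool) :
    startsP prev (c :: m) = (if c && !prev then [0] else []) ++ (startsP c m).map (· + 1) := by
  unfold startsP
  rw [List.length_cons, List.range_succ_eq_map, List.filter_cons, List.filter_map]
  rw [List.filter_congr (q := fun i => m.getD i false && !(if i = 0 then c else m.getD (i - 1) false)) ?_]
  · rw [show ((c :: m).getD 0 false && !(if 0 = 0 then prev else (c :: m).getD (0 - 1) false)) = (c && !prev) from by simp]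
    by_cases h : (c && !prev) = true <;>
      simp [h, List.map_map, Nat.succ_eq_add_one, Function.comp]
  · intro i _
    cases i with
    | zero => simp
    | succ j => simp

theorem endsOf_cons (c : Bool) (m : List Bool) :
    endsOf (c :: m) = (if c && !(m.getD 0 false) then [1] else []) ++ (endsOf m).map (· + 1) := by
  unfold endsOf
  rw [List.length_cons, List.range_succ_eq_map, List.filter_cons, List.filter_map]
  rw [List.filter_congr (q := fun j => m.getD j false && (decide (j = m.length - 1) || !(m.getD (j + 1) false))) ?_]
  · rw [show ((c :: m).getD 0 false && (decide (0 = m.length + 1 - 1) || !((c :: m).getD (0 + 1) false))) = (c && !(m.getD 0 false)) from by cases m <;> simp]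
    have h1 : ∀ T : List Nat, List.map (fun x : Nat => x + 1) (List.map Nat.succ T) = List.map (fun x : Nat => x + 2) T := by
      intro T; rw [List.map_map]; apply List.map_congr_left; intro a _; simp [Function.comp]
    have h2 : ∀ T : List Nat, List.map (fun x : Nat => x + 1) (List.map (fun x : Nat => x + 1) T) = List.map (fun x : Nat => x + 2) T := by
      intro T; rw [List.map_map]; apply List.map_congr_left; intro a _; simp [Function.comp]
    by_cases hc : c = true <;> by_cases h0 : m[0]?.getD false = true <;>
      simp [hc, h0, h1, h2, List.getD]
  · intro i hi
    simp only [List.mem_range] at hi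
    simp only [Function.comp_apply, List.getD_cons_succ, List.length_cons, Nat.add_sub_cancel]
    rw [show (decide (i + 1 = m.length)) = (decide (i = m.length - 1)) from decide_eq_decide.mpr (by omega)]

theorem endsOf_true_ne_nil (m : List Bool) : endsOf (true :: m) ≠ [] := by
  induction m with
  | nil => simp [endsOf_cons]
  | cons d m' ih =>
    rw [endsOf_cons]
    cases d with
    | false => simp
    | true => simp [ih]

theorem startsOf_eq (m : List Bool) : startsOf m = startsP false m := by
  unfold startsOf startsP
  apply List.filter_congr
  intro i _
  by_cases h : i = 0 <;> simp [h]

def altL (bg : List Int) (l : List (Int × String)) : List (List String × List Int) :=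
  sites_from_states_alt (l.map Prod.fst) (l.map Prod.snd) bg

theorem altL_eq (bg : List Int) (l : List (Int × String)) :
    altL bg l = ((startsP false (l.map (fun q => !bg.contains q.1))).zip
        (endsOf (l.map (fun q => !bg.contains q.1)))).map (fun ab =>
      (PySem.List.slice (l.map Prod.snd) (some (ab.1 : Int)) (some (ab.2 : Int)),
       PySem.List.slice (l.map Prod.fst) (some (ab.1 : Int)) (some (ab.2 : Int)))) := by
  unfold altL sites_from_states_alt
  simp only [startsOf_eq, List.map_map]
  rfl

theorem zip_shift (S E : List Nat) (sts : List Int) (seq : List String) (x : Int) (y : String) :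
    ((S.map (fun i : Nat => i + 1)).zip (E.map (fun i : Nat => i + 1))).map
      (fun ab => (PySem.List.slice (y :: seq) (some (ab.1 : Int)) (some (ab.2 : Int)),
                  PySem.List.slice (x :: sts) (some (ab.1 : Int)) (some (ab.2 : Int))))
    = (S.zip E).map
      (fun ab => (PySem.List.slice seq (some (ab.1 : Int)) (some (ab.2 : Int)),
                  PySem.List.slice sts (some (ab.1 : Int)) (some (ab.2 : Int)))) := by
  rw [List.zip_map, List.map_map]
  apply List.map_congr_left
  intro ab _
  obtain ⟨a, b⟩ := ab
  simp [Prod.map, PySem.List.slice_natCast, Nat.succ_sub_succ]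

theorem altL_skip (bg : List Int) (s : Int) (b : String) (l : List (Int × String))
    (h : s ∈ bg) : altL bg ((s, b) :: l) = altL bg l := by
  rw [altL_eq, altL_eq]
  have hm : ((s, b) :: l).map (fun q : Int × String => !bg.contains q.1)
      = false :: l.map (fun q : Int × String => !bg.contains q.1) := by simp [h]
  rw [hm, startsP_cons, endsOf_cons,
    show ((s, b) :: l).map Prod.snd = b :: l.map Prod.snd from rfl,
    show ((s, b) :: l).map Prod.fst = s :: l.map Prod.fst from rfl]
  simp only [Bool.false_and, Bool.false_eq_true, if_false, List.nil_append]
  exact zip_shift _ _ _ _ s b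

theorem altL_run (bg : List Int) (s : Int) (b : String) (l : List (Int × String))
    (h : s ∉ bg) :
    altL bg ((s, b) :: l) =
      (b :: (l.takeWhile (fun p => !bg.contains p.1)).map Prod.snd,
       s :: (l.takeWhile (fun p => !bg.contains p.1)).map Prod.fst)
      :: altL bg (l.dropWhile (fun p => !bg.contains p.1)) := by
  induction l generalizing s b with
  | nil =>
    rw [altL_eq]
    have hm : [(s, b)].map (fun q : Int × String => !bg.contains q.1) = [true] := by simp [h]
    rw [hm, startsP_cons, endsOf_cons]
    simp [altL, sites_from_states_alt, startsOf, endsOf, startsP, PySem.List.slice_natCast]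
  | cons q l' ih =>
    obtain ⟨s2, b2⟩ := q
    have hm' : ((s2, b2) :: l').map (fun q : Int × String => !bg.contains q.1)
        = (!bg.contains s2) :: l'.map (fun q : Int × String => !bg.contains q.1) := rfl
    by_cases h2 : s2 ∈ bg
    · have hp : (!bg.contains (s2, b2).1) = false := by simp [h2]
      simp only [List.takeWhile_cons, List.dropWhile_cons, hp, Bool.false_eq_true, if_false,
        List.map_nil]
      rw [altL_skip bg s2 b2 l' h2, altL_eq, altL_eq]
      have hm1 : ((s, b) :: (s2, b2) :: l').map (fun q : Int × String => !bg.contains q.1)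
          = true :: false :: l'.map (fun q : Int × String => !bg.contains q.1) := by simp [h, h2]
      rw [hm1, startsP_cons, startsP_cons, endsOf_cons, endsOf_cons]
      simp only [Bool.not_false, Bool.and_true, Bool.true_and, Bool.false_and, Bool.not_true,
        List.getD_cons_zero, if_true, Bool.false_eq_true, if_false, List.nil_append,
        List.map_cons, List.singleton_append, List.map_nil]
      rw [List.zip_cons_cons, List.map_cons]
      congr 1 <;> first
        | rw [zip_shift, zip_shift]
        | simp [pysem]
    · have hp : (!bg.contains (s2, b2).1) = true := by simp [h2]
      simp only [List.takeWhile_cons, List.dropWhile_cons, hp, if_true, List.map_cons]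
      have IH := ih s2 b2 h2
      obtain ⟨e, E, hE⟩ : ∃ e E, endsOf (true :: l'.map (fun q : Int × String => !bg.contains q.1)) = e :: E := by
        cases hx : endsOf (true :: l'.map (fun q : Int × String => !bg.contains q.1)) with
        | nil => exact absurd hx (endsOf_true_ne_nil _)
        | cons a t => exact ⟨a, t, rfl⟩
      have hm2 : ((s2, b2) :: l').map (fun q : Int × String => !bg.contains q.1)
          = true :: l'.map (fun q : Int × String => !bg.contains q.1) := by simp [h2]
      rw [altL_eq, hm2, startsP_cons, hE] at IH
      simp only [Bool.not_false, Bool.and_true, Bool.true_and, if_true, List.singleton_append,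
        List.map_cons, List.zip_cons_cons] at IH
      simp only [List.cons.injEq] at IH
      obtain ⟨hh, ht⟩ := IH
      rw [altL_eq]
      have hm1 : ((s, b) :: (s2, b2) :: l').map (fun q : Int × String => !bg.contains q.1)
          = true :: true :: l'.map (fun q : Int × String => !bg.contains q.1) := by simp [h, h2]
      rw [hm1, startsP_cons, startsP_cons, endsOf_cons, hE]
      simp only [Bool.not_true, Bool.and_false, Bool.not_false, Bool.and_true, Bool.true_and,
        if_true, Bool.false_eq_true, if_false, List.getD_cons_zero, List.nil_append,
        List.singleton_append, List.map_cons, List.zip_cons_cons]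
      congr 1
      · simp only [Prod.mk.injEq] at hh ⊢
        obtain ⟨hh1, hh2⟩ := hh
        constructor
        · simp [pysem] at hh1
          try simp [pysem]
          rw [show ((e : Int) + 1) = (((e + 1 : Nat) : Int)) from by push_cast; ring,
            PySem.List.slice_to_natCast]
          simp [List.take_succ_cons, hh1]
        · simp [pysem] at hh2
          try simp [pysem]
          rw [show ((e : Int) + 1) = (((e + 1 : Nat) : Int)) from by push_cast; ring,
            PySem.List.slice_to_natCast]
          simp [List.take_succ_cons, hh2]
      · rw [zip_shift]
        exact ht

-- out of a site, a background element is skipped by A's loop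
theorem aGo_skip_bg (bg : List Int) (s : Int) (b : String) (l : List (Int × String))
    (h : s ∈ bg) :
    sitesAGo bg [] [] false ((s, b) :: l) = sitesAGo bg [] [] false l := by
  simp [sitesAGo, h]

-- inside a site, A's loop accumulates the maximal non-background run, emits it,
-- and continues out-of-site on the remainder
theorem aGo_run (bg : List Int) (l : List (Int × String)) :
    ∀ seq0 sts0, sitesAGo bg seq0 sts0 true l =
      (seq0 ++ (l.takeWhile (fun p => !bg.contains p.1)).map (·.2),
       sts0 ++ (l.takeWhile (fun p => !bg.contains p.1)).map (·.1))
      :: sitesAGo bg [] [] false (l.dropWhile (fun p => !bg.contains p.1)) := by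
  induction l with
  | nil => intro seq0 sts0; simp [sitesAGo]
  | cons hd tl ih =>
    intro seq0 sts0
    obtain ⟨s, b⟩ := hd
    by_cases h : s ∈ bg
    · have hskip := aGo_skip_bg bg s b tl h
      simp [sitesAGo, List.takeWhile, List.dropWhile, h, hskip]
    · simp [sitesAGo, List.takeWhile, List.dropWhile, h, ih, List.append_assoc]

-- A's loop and B's staged index computation agree on every zipped input
theorem go_eq (bg : List Int) : ∀ (n : Nat) (l : List (Int × String)), l.length ≤ n →
    sitesAGo bg [] [] false l = altL bg l := by
  intro n
  induction n with
  | zero =>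
    intro l hl
    cases l with
    | nil => simp [sitesAGo, altL, sites_from_states_alt, startsOf, endsOf]
    | cons hd tl => simp only [List.length_cons] at hl; omega
  | succ n ih =>
    intro l hl
    cases l with
    | nil => simp [sitesAGo, altL, sites_from_states_alt, startsOf, endsOf]
    | cons hd tl =>
      obtain ⟨s, b⟩ := hd
      have hl' : tl.length ≤ n := by simp only [List.length_cons] at hl; omega
      by_cases h : s ∈ bg
      · rw [aGo_skip_bg bg s b tl h, altL_skip bg s b tl h]
        exact ih tl hl'
      · have hb : sitesAGo bg [] [] false ((s, b) :: tl) = sitesAGo bg [b] [s] true tl := by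
          simp [sitesAGo, h]
        have hd : (tl.dropWhile (fun p => !bg.contains p.1)).length ≤ n :=
          le_trans (List.length_dropWhile_le _ _) hl'
        rw [hb, aGo_run, altL_run bg s b tl h, ih _ hd]
        simp

-- ===== VERDICT (by name: the statement is the Claim_ definition above) =====
theorem sites_from_states_spec : Claim_equal_sites_from_states := by
  intro states sequence bg _ hlen
  unfold Spec_sites_from_states sites_from_states
  rw [go_eq bg (states.zip sequence).length (states.zip sequence) le_rfl]
  unfold altL
  rw [List.map_fst_zip (le_of_eq hlen), List.map_snd_zip (le_of_eq hlen.symm)]
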